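-- pv_equiv track=rewrite | github.com/stanford-crfm/levanter | src/levanter/optim/shampoo3.py | _get_preconditioner_types
-- ===== SOURCE A (Python) =====
-- from typing import List, Optional, Tuple, Union
--
-- def _get_preconditioner_types(shape: Tuple[int, ...], max_precond_dim: int) -> List[bool]:
--     if len(shape) == 0:
--         return [False]
--
--     if len(shape) == 1:
--         return [False]
--
--     min_dim = min(shape)
--     new_result = []
--     flag = True
--     for i in range(len(shape)):
--         if shape[i] == min_dim and flag:
--             flag = False
--             new_result.append(False)
--         else:
--             new_result.append(True)
--     return new_result
-- ===== SOURCE B (Python) =====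
-- from typing import List, Tuple
--
-- def _get_preconditioner_types(shape: Tuple[int, ...], max_precond_dim: int) -> List[bool]:
--     if len(shape) <= 1:
--         return [False]
--     # Single right-to-left pass: build the mask of the suffix (in reversed
--     # order), keeping the running minimum m and the position fpos of the one
--     # False cell; when a new (or equal) minimum appears further left, the old
--     # False is patched to True and the new cell becomes the False.
--     m = shape[-1]
--     rev = [False]
--     fpos = 0
--     for x in reversed(shape[:-1]):
--         if x <= m:
--             m = x
--             rev[fpos] = True
--             fpos = len(rev)
--             rev.append(False)
--         else:
--             rev.append(True)
--     rev.reverse()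
--     return rev
-- ===== Notes on version B (the rewrite author's own statement) =====
-- stated objective: alternative
-- what changed: Replaces A's two-stage plan (precompute min(shape), then a left-to-right loop with a mutable 'first match' flag testing equality) by a single right-to-left pass that never computes the minimum up front: it maintains the running minimum of the suffix and a patchable output cell, patching the previous False to True whenever an element <= the running minimum appears further left, then reverses the built list.
import Mathlib
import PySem

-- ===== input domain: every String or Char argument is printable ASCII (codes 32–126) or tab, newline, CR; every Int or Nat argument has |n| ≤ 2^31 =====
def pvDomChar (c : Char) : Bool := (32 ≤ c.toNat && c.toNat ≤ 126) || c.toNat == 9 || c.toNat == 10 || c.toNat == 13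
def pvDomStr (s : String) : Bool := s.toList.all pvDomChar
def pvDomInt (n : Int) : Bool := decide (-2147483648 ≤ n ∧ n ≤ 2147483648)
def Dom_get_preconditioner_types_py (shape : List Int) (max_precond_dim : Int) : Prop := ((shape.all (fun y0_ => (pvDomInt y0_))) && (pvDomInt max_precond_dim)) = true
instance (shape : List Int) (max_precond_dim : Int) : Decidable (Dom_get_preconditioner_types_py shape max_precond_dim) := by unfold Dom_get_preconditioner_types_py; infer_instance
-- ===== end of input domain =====

-- B replaces A's min()-then-flagged-left-scan by one right-to-left pass keeping a running minimum and patching the output; return value only, same results.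


-- ===== PORT A =====
-- the for-loop over range(len(shape)) reading shape[i] in order, as structural recursion over shape carrying the flag
def pvALoop (min_dim : Int) (flag : Bool) : List Int → List Bool
  | [] => []
  | x :: xs =>
    if x == min_dim && flag then false :: pvALoop min_dim false xs
    else true :: pvALoop min_dim flag xs

def get_preconditioner_types_py (shape : List Int) (_max_precond_dim : Int) : List Bool :=
  if shape.length == 0 then [false]
  else if shape.length == 1 then [false]
  else
    let min_dim := (PySem.List.min? shape id).getD 0   -- min(shape); shape nonempty here
    pvALoop min_dim true shape

-- ===== PORT B =====
-- the 'for x in reversed(shape[:-1])' loop: state (m, rev, fpos); 'rev.reverse' is Source B's final rev.reverse()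
def pvBLoop (m : Int) (rev : List Bool) (fpos : Nat) : List Int → List Bool
  | [] => rev.reverse
  | x :: xs =>
    if x ≤ m then pvBLoop x ((rev.set fpos true) ++ [false]) rev.length xs
    else pvBLoop m (rev ++ [true]) fpos xs

def get_preconditioner_types_py_alt (shape : List Int) (_max_precond_dim : Int) : List Bool :=
  if shape.length ≤ 1 then [false]
  else
    pvBLoop ((PySem.List.pyGet? shape (-1)).getD 0)    -- m = shape[-1]; shape nonempty here
      [false] 0
      ((PySem.List.slice shape none (some (-1))).reverse)   -- reversed(shape[:-1])

-- ===== PRECONDITION & SPEC =====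
def Spec_get_preconditioner_types_py (shape : List Int) (max_precond_dim : Int) (out : List Bool) : Prop := out = get_preconditioner_types_py_alt shape max_precond_dim
instance (shape : List Int) (max_precond_dim : Int) (out : List Bool) : Decidable (Spec_get_preconditioner_types_py shape max_precond_dim out) := by unfold Spec_get_preconditioner_types_py; infer_instance

-- ===== CLAIM (what is proved, stated in full; the proofs are below) =====
def Claim_equal_get_preconditioner_types_py : Prop := ∀ (shape : List Int) (max_precond_dim : Int), Dom_get_preconditioner_types_py shape max_precond_dim → Spec_get_preconditioner_types_py shape max_precond_dim (get_preconditioner_types_py shape max_precond_dim)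

-- ===== LEMMAS AND PROOFS =====

-- shorthand (proof-only): Python's min(s) with default, and the reversed-mask shape rm k j
def pvMinD (s : List Int) : Int := (PySem.List.min? s id).getD 0

def pvRm (k j : Nat) : List Bool := List.replicate k true ++ false :: List.replicate j true

theorem pvMinD_cons (x : Int) (s : List Int) : pvMinD (x :: s) = s.foldl min x := by
  unfold pvMinD
  rw [show (id : Int → Int) = (fun y => y) from rfl, PySem.List.min?_id_cons]
  rfl

theorem pvFoldl_min_comm (s : List Int) (a b : Int) :
    s.foldl min (min a b) = min a (s.foldl min b) := by
  induction s generalizing b with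
  | nil => rfl
  | cons y t ih => simp only [List.foldl_cons, min_assoc, ih]

theorem pvMinD_cons_cons (x y : Int) (s : List Int) :
    pvMinD (x :: y :: s) = min x (pvMinD (y :: s)) := by
  rw [pvMinD_cons, pvMinD_cons, List.foldl_cons, pvFoldl_min_comm]

theorem pvRm_length (k j : Nat) : (pvRm k j).length = k + j + 1 := by
  simp [pvRm]; omega

theorem pvRm_set (k j : Nat) : (pvRm k j).set k true ++ [false] = pvRm (k + j + 1) 0 := by
  simp only [pvRm, List.set_append, List.length_replicate, lt_irrefl, if_false,
    Nat.sub_self, List.set_cons_zero, List.replicate_zero]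
  rw [show (true :: List.replicate j true) = List.replicate (j + 1) true from rfl,
    ← List.replicate_add]
  congr 2

theorem pvRm_append (k j : Nat) : pvRm k j ++ [true] = pvRm k (j + 1) := by
  simp [pvRm, List.replicate_succ']

theorem pvRm_reverse (k j : Nat) : (pvRm k j).reverse = pvRm j k := by
  simp [pvRm, List.reverse_cons]

-- B's loop invariant: processing the reversed remainder xs on top of an already-built
-- suffix s (with min-index j and k cells to its right) yields the reversed mask of xs.reverse ++ s
theorem pvB_inv (xs : List Int) : ∀ (s : List Int) (j k : Nat), s ≠ [] →
    PySem.List.index? s (pvMinD s) = some j → s.length = k + j + 1 →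
    ∃ J K, PySem.List.index? (xs.reverse ++ s) (pvMinD (xs.reverse ++ s)) = some J ∧
      (xs.reverse ++ s).length = K + J + 1 ∧
      pvBLoop (pvMinD s) (pvRm k j) k xs = (pvRm K J).reverse := by
  induction xs with
  | nil => intro s j k _ hj hk; exact ⟨j, k, by simpa using hj, by simpa using hk, rfl⟩
  | cons x xs ih =>
    intro s j k hs hj hk
    obtain ⟨y, t, rfl⟩ := List.exists_cons_of_ne_nil hs
    have hmin : pvMinD (x :: y :: t) = min x (pvMinD (y :: t)) := pvMinD_cons_cons x y t
    have hstep : (x :: xs).reverse ++ (y :: t) = xs.reverse ++ (x :: y :: t) := by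
      simp [List.reverse_cons, List.append_assoc]
    rw [hstep]
    show (∃ J K, _ ∧ _ ∧ pvBLoop _ _ _ (x :: xs) = _)
    by_cases hx : x ≤ pvMinD (y :: t)
    · have hm : pvMinD (x :: y :: t) = x := by rw [hmin]; exact min_eq_left hx
      have hj' : PySem.List.index? (x :: y :: t) (pvMinD (x :: y :: t)) = some 0 := by
        rw [hm]; exact PySem.List.index?_cons_self x (y :: t)
      have hrec := ih (x :: y :: t) 0 (k + j + 1) (by simp) hj' (by simp at hk ⊢; omega)
      rw [hm] at hrec
      simpa [pvBLoop, if_pos hx, pvRm_set, pvRm_length] using hrec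
    · have hlt : pvMinD (y :: t) < x := lt_of_not_ge hx
      have hm : pvMinD (x :: y :: t) = pvMinD (y :: t) := by
        rw [hmin]; exact min_eq_right (le_of_lt hlt)
      have hj' : PySem.List.index? (x :: y :: t) (pvMinD (x :: y :: t)) = some (j + 1) := by
        rw [hm, PySem.List.index?_cons_of_ne _ (ne_of_gt hlt), hj]; rfl
      have hrec := ih (x :: y :: t) (j + 1) k (by simp) hj' (by simp at hk ⊢; omega)
      rw [hm] at hrec
      simpa [pvBLoop, if_neg hx, pvRm_append] using hrec

-- A's loop with the flag already cleared marks every remaining position True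
theorem pvALoop_false (m : Int) (xs : List Int) :
    pvALoop m false xs = xs.map (fun _ => true) := by
  induction xs with
  | nil => rfl
  | cons x xs ih => simp [pvALoop, ih]

-- A's flag-loop produces the replicate-form mask at the first index of m
theorem pvALoop_eq_rm (xs : List Int) (m : Int) (j : Nat)
    (hj : PySem.List.index? xs m = some j) :
    pvALoop m true xs = List.replicate j true ++ false :: List.replicate (xs.length - j - 1) true := by
  induction xs generalizing j with
  | nil => simp [PySem.List.index?] at hj
  | cons x xs ih =>
    by_cases hx : x = m
    · subst hx
      rw [PySem.List.index?_cons_self] at hj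
      cases hj
      simp [pvALoop, pvALoop_false]
    · rw [PySem.List.index?_cons_of_ne _ hx] at hj
      obtain ⟨j', hj', rfl⟩ := Option.map_eq_some_iff.mp hj
      have hbx : (x == m) = false := by simp [hx]
      simp only [pvALoop, hbx, Bool.false_and, if_neg Bool.false_ne_true, ih j' hj',
        List.length_cons, List.replicate_succ]
      simp

-- ===== VERDICT (by name: the statement is the Claim_ definition above) =====
theorem get_preconditioner_types_py_spec : Claim_equal_get_preconditioner_types_py := by
  intro shape max_precond_dim _
  unfold Spec_get_preconditioner_types_py
  match shape with
  | [] => rfl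
  | [x] => rfl
  | x :: y :: rest =>
    -- B side: set up the invariant with s = [last], xs = reversed dropLast
    have hne : (x :: y :: rest) ≠ [] := by simp
    have hsplit : (x :: y :: rest).dropLast ++ [(x :: y :: rest).getLast hne] = x :: y :: rest :=
      List.dropLast_append_getLast hne
    set L := (x :: y :: rest).getLast hne with hL
    have hminL : pvMinD [L] = L := by simp [pvMinD, PySem.List.min?]
    have hjL : PySem.List.index? [L] (pvMinD [L]) = some 0 := by
      rw [hminL]; exact PySem.List.index?_cons_self L []
    obtain ⟨J, K, hJ, hK, hB⟩ :=
      pvB_inv ((x :: y :: rest).dropLast.reverse) [L] 0 0 (by simp) hjL (by simp)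
    rw [List.reverse_reverse, hsplit] at hJ hK
    have hminEq : pvMinD [L] = (PySem.List.pyGet? (x :: y :: rest) (-1)).getD 0 := by
      rw [hminL, PySem.List.pyGet?_neg_one, List.getLast?_eq_some_getLast hne]
      rfl
    -- A side
    have hA := pvALoop_eq_rm (x :: y :: rest) (pvMinD (x :: y :: rest)) J hJ
    have hlen : (x :: y :: rest).length - J - 1 = K := by omega
    rw [hlen] at hA
    show pvALoop ((PySem.List.min? (x :: y :: rest) id).getD 0) true (x :: y :: rest) = _
    rw [show ((PySem.List.min? (x :: y :: rest) id).getD 0) = pvMinD (x :: y :: rest) from rfl, hA]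
    rw [get_preconditioner_types_py_alt]
    rw [if_neg (by simp), PySem.List.slice_to_neg_one, ← hminEq, hminL]
    rw [hminL] at hB
    rw [show ([false] : List Bool) = pvRm 0 0 from rfl, hB, pvRm_reverse, pvRm]
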